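-- pv_equiv track=rewrite | github.com/FreytagPhilipp/simple-sudokuSolver | KnfMethods.py | subsumAndRemoveDuplicatesFromKNF
-- ===== SOURCE A (Python) =====
-- def subsumAndRemoveDuplicatesFromKNF(knf : list) -> list:
--     """removes duplicates and subsums a list of clauses
--
--     Args:
--         knf list(list(tuple(bool, str))): is a list of clauses
--
--     Returns:
--         list(list(tuple(bool, str))): preprocessed list
--     """
--
--     tmp = list()
--     #delete duplicates
--     for clause in knf[:-1]:
--         if clause in knf[knf.index(clause) + 1:]:
--             knf.remove(clause)
--
--     def subsums(smallerC, biggerC) -> bool: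
--         result = True
--         for literal1 in smallerC:
--             if literal1 not in biggerC:
--                 result = False
--                 break
--         return result
--
--     #collect broader clauses
--     for clauseOrg in knf[:-1]:
--         for clauseOther in knf[knf.index(clauseOrg) + 1:]:
--             if len(clauseOther) > len(clauseOrg) and subsums(clauseOrg, clauseOther) and clauseOther not in tmp:
--                 #add clauseOther to delete-List
--                 tmp.append(clauseOther)
--             elif len(clauseOther) < len(clauseOrg) and subsums(clauseOther, clauseOrg) and clauseOrg not in tmp:
--                 #add clauseOrg to delete-List
--                 tmp.append(clauseOrg)
--
--     #delete all occurences of broader clauses in result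
--     for clause in tmp:
--         while clause in knf:
--             knf.remove(clause)
--
--     return knf.copy()
-- ===== SOURCE B (Python) =====
-- def subsumAndRemoveDuplicatesFromKNF(knf : list) -> list:
--     """removes duplicates and subsums a list of clauses (different decomposition:
--     dedup keeping the last occurrence, then one filtering pass; same in-place mutation)"""
--     seen = set()
--     dedup_rev = []
--     for clause in reversed(knf):
--         key = tuple(clause)
--         if key not in seen:
--             seen.add(key)
--             dedup_rev.append(clause)
--     dedup = dedup_rev[::-1]
--
--     result = []
--     for c in dedup:
--         cs = set(c)
--         if not any(len(d) < len(c) and all(lit in cs for lit in d) for d in dedup):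
--             result.append(c)
--
--     knf[:] = result
--     return list(result)
-- ===== Notes on version B (the rewrite author's own statement) =====
-- stated objective: alternative
-- what changed: A's mutate-while-iterating duplicate removal and mark-then-delete subsumption (with repeated list.index/list.remove scans over knf) are replaced by a set-based reverse-traversal dedup keeping the last occurrence of each clause followed by a single filtering pass that keeps a clause iff no strictly shorter clause is literal-contained in it; B performs the same in-place mutation of knf.
import Mathlib
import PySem

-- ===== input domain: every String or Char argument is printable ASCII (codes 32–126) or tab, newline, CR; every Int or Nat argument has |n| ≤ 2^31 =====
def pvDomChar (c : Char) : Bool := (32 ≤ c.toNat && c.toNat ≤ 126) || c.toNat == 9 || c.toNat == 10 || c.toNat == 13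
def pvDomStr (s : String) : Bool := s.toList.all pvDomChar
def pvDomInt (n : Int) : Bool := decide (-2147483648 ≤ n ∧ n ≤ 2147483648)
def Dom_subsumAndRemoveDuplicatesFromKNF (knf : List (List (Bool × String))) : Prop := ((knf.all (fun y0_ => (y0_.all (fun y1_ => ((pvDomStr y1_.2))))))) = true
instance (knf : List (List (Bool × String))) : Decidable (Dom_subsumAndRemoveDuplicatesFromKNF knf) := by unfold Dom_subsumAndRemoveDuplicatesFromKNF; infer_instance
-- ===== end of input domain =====

-- B replaces A's mutate-while-iterating dedup and mark-then-delete subsumption by a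
-- reverse-dedup (keep last occurrence) followed by one filtering pass; A mutates its
-- argument in place (B performs the same mutation in Python); equivalence here is about
-- the return value.

abbrev pvClause : Type := List (Bool × String)

-- ===== PORT A =====
-- one iteration of A's first loop body (knf[i+1:] with 0 <= i+1 is List.drop (i+1))
def pvDedupStep (k : List pvClause) (clause : pvClause) : List pvClause :=
  match PySem.List.index? k clause with
  | some i => if clause ∈ k.drop (i + 1) then (PySem.List.remove? k clause).getD k else k
  | none => k

def pvSubsums (smallerC biggerC : pvClause) : Bool :=
  match smallerC with
  | [] => true
  | literal1 :: rest => if literal1 ∈ biggerC then pvSubsums rest biggerC else false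

-- body of A's inner `for clauseOther in ...` loop
def pvCollectStep (clauseOrg : pvClause) (tmp : List pvClause) (clauseOther : pvClause) : List pvClause :=
  if decide (clauseOther.length > clauseOrg.length) && pvSubsums clauseOrg clauseOther && !(tmp.contains clauseOther) then
    tmp ++ [clauseOther]
  else if decide (clauseOther.length < clauseOrg.length) && pvSubsums clauseOther clauseOrg && !(tmp.contains clauseOrg) then
    tmp ++ [clauseOrg]
  else tmp

-- A's inner loop: iterate over knf[knf.index(clauseOrg)+1:]
def pvCollectInner (k : List pvClause) (tmp : List pvClause) (clauseOrg : pvClause) : List pvClause :=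
  (k.drop ((PySem.List.index? k clauseOrg).getD 0 + 1)).foldl (pvCollectStep clauseOrg) tmp

-- A's `while clause in knf: knf.remove(clause)` loop
def pvRemoveAll (k : List pvClause) (clause : pvClause) : List pvClause :=
  if h : clause ∈ k then pvRemoveAll ((PySem.List.remove? k clause).getD k) clause else k
termination_by k.length
decreasing_by
  rw [PySem.List.remove?_eq_some_erase k clause h]
  have := List.length_pos_of_mem h
  simp [List.length_erase_of_mem h]; omega

def subsumAndRemoveDuplicatesFromKNF (knf : List pvClause) : List pvClause :=
  -- delete duplicates (loop over the snapshot knf[:-1], mutating knf)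
  let k1 := knf.dropLast.foldl pvDedupStep knf
  -- collect broader clauses
  let tmp := k1.dropLast.foldl (pvCollectInner k1) []
  -- delete all occurrences of broader clauses, then return knf.copy()
  tmp.foldl pvRemoveAll k1

-- ===== PORT B =====
-- body of B's reversed-dedup loop (seen set, accumulator)
def pvKeepDedStep (p : PySem.Set pvClause × List pvClause) (clause : pvClause) : PySem.Set pvClause × List pvClause :=
  if PySem.Set.contains p.1 clause then p else (PySem.Set.add p.1 clause, p.2 ++ [clause])

def subsumAndRemoveDuplicatesFromKNF_alt (knf : List pvClause) : List pvClause :=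
  let dedup := (knf.reverse.foldl pvKeepDedStep (PySem.Set.empty, [])).2.reverse
  dedup.filter (fun c =>
    let cs : PySem.Set (Bool × String) := PySem.Set.ofList c
    !(dedup.any (fun d => decide (d.length < c.length) && d.all (fun lit => PySem.Set.contains cs lit))))

-- ===== PRECONDITION & SPEC =====
def Spec_subsumAndRemoveDuplicatesFromKNF (knf : List (List (Bool × String))) (out : List (List (Bool × String))) : Prop := out = subsumAndRemoveDuplicatesFromKNF_alt knf
instance (knf : List (List (Bool × String))) (out : List (List (Bool × String))) : Decidable (Spec_subsumAndRemoveDuplicatesFromKNF knf out) := by unfold Spec_subsumAndRemoveDuplicatesFromKNF; infer_instance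

-- ===== CLAIM (what is proved, stated in full; the proofs are below) =====
def Claim_equal_subsumAndRemoveDuplicatesFromKNF : Prop := ∀ (knf : List (List (Bool × String))), Dom_subsumAndRemoveDuplicatesFromKNF knf → Spec_subsumAndRemoveDuplicatesFromKNF knf (subsumAndRemoveDuplicatesFromKNF knf)

-- ===== LEMMAS AND PROOFS =====

-- keep the LAST occurrence of each clause (the common shape of both dedup phases)
def pvKeepLast (l : List pvClause) : List pvClause := (PySem.Set.ofList l.reverse).reverse

lemma pvOfList_concat (l : List pvClause) (x : pvClause) :
    PySem.Set.ofList (l ++ [x]) = PySem.Set.add (PySem.Set.ofList l) x := by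
  simp [PySem.Set.ofList_eq_foldl, List.foldl_append]

lemma pvKeepLast_cons_mem {x : pvClause} {t : List pvClause} (h : x ∈ t) :
    pvKeepLast (x :: t) = pvKeepLast t := by
  simp [pvKeepLast, pvOfList_concat, PySem.Set.add, h]

lemma pvKeepLast_cons_not_mem {x : pvClause} {t : List pvClause} (h : x ∉ t) :
    pvKeepLast (x :: t) = x :: pvKeepLast t := by
  simp [pvKeepLast, pvOfList_concat, PySem.Set.add, h]

lemma pvKeepLast_nodup (l : List pvClause) : (pvKeepLast l).Nodup := by
  simpa [pvKeepLast] using PySem.Set.nodup_ofList (xs := l.reverse)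

-- ---- phase 1 of A equals pvKeepLast ----

lemma pvDedupStep_cons_of_ne (x : pvClause) (k : List pvClause) (c : pvClause) (h : x ≠ c) :
    pvDedupStep (x :: k) c = x :: pvDedupStep k c := by
  unfold pvDedupStep
  rw [PySem.List.index?_cons_of_ne k h]
  cases hi : PySem.List.index? k c with
  | none => simp
  | some i =>
    simp only [Option.map_some]
    have hdrop : (x :: k).drop (i + 1 + 1) = k.drop (i + 1) := rfl
    rw [hdrop]
    by_cases hm : c ∈ k.drop (i + 1)
    · simp only [hm, if_true]
      rw [PySem.List.remove?_cons_of_ne k h]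
      cases hr : PySem.List.remove? k c with
      | none => simp
      | some r => simp
    · simp [hm]

lemma pvFoldl_dedupStep_cons (x : pvClause) (k : List pvClause) (s : List pvClause)
    (h : ∀ c ∈ s, c ≠ x) : s.foldl pvDedupStep (x :: k) = x :: s.foldl pvDedupStep k := by
  induction s generalizing k with
  | nil => rfl
  | cons c s ih =>
    simp only [List.foldl_cons]
    rw [pvDedupStep_cons_of_ne x k c (fun e => (h c (by simp) ) e.symm)]
    exact ih (pvDedupStep k c) (fun c hc => h c (by simp [hc]))

lemma pvPhase1_eq_keepLast (knf : List pvClause) :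
    knf.dropLast.foldl pvDedupStep knf = pvKeepLast knf := by
  induction knf with
  | nil => rfl
  | cons x t ih =>
    cases t with
    | nil => simp [pvKeepLast, PySem.Set.ofList, PySem.Set.add]
    | cons y t' =>
      have hsnap : (x :: y :: t').dropLast = x :: (y :: t').dropLast := rfl
      rw [hsnap, List.foldl_cons]
      by_cases hx : x ∈ y :: t'
      · have hstep : pvDedupStep (x :: y :: t') x = y :: t' := by
          unfold pvDedupStep
          rw [PySem.List.index?_cons_self]
          simp [hx]
        rw [hstep, ih, pvKeepLast_cons_mem hx]
      · have hstep : pvDedupStep (x :: y :: t') x = x :: y :: t' := by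
          unfold pvDedupStep
          rw [PySem.List.index?_cons_self]
          simp [hx]
        rw [hstep]
        rw [pvFoldl_dedupStep_cons x (y :: t') ((y :: t').dropLast)
          (fun c hc e => hx (e ▸ (List.dropLast_sublist (y :: t')).mem hc))]
        rw [ih, pvKeepLast_cons_not_mem hx]

-- ---- B's reversed dedup equals pvKeepLast ----

lemma pvKeepDed_pair (l : List pvClause) (s : PySem.Set pvClause) :
    l.foldl pvKeepDedStep (s, s) = (l.foldl PySem.Set.add s, l.foldl PySem.Set.add s) := by
  induction l generalizing s with
  | nil => rfl
  | cons c l ih =>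
    simp only [List.foldl_cons]
    by_cases hc : c ∈ s
    · have h1 : pvKeepDedStep (s, s) c = (s, s) := by
        simp [pvKeepDedStep, PySem.Set.contains_iff, hc]
      have h2 : PySem.Set.add s c = s := by simp [PySem.Set.add, PySem.Set.contains_iff, hc]
      rw [h1, h2]; exact ih s
    · have h2 : PySem.Set.add s c = s ++ [c] := by
        simp [PySem.Set.add, PySem.Set.contains_iff, hc]
      have h1 : pvKeepDedStep (s, s) c = (s ++ [c], s ++ [c]) := by
        simp [pvKeepDedStep, PySem.Set.contains_iff, PySem.Set.add, hc]
      rw [h1, h2]; exact ih (s ++ [c])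

lemma pvAltDedup_eq (knf : List pvClause) :
    (knf.reverse.foldl pvKeepDedStep (PySem.Set.empty, [])).2.reverse = pvKeepLast knf := by
  have h0 : (PySem.Set.empty, ([] : List pvClause)) = (([] : PySem.Set pvClause), ([] : PySem.Set pvClause)) := rfl
  rw [h0, pvKeepDed_pair]
  simp [pvKeepLast, PySem.Set.ofList_eq_foldl]

-- ---- subsums characterisation ----

lemma pvSubsums_iff (d c : pvClause) : pvSubsums d c = true ↔ ∀ l ∈ d, l ∈ c := by
  induction d with
  | nil => simp [pvSubsums]
  | cons a d ih =>
    by_cases ha : a ∈ c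
    · simp [pvSubsums, ha, ih]
    · simp [pvSubsums, ha]

-- ---- mark-then-delete phase ----

def pvB1 (org other c : pvClause) : Prop :=
  (c = other ∧ org.length < other.length ∧ pvSubsums org other = true) ∨
  (c = org ∧ other.length < org.length ∧ pvSubsums other org = true)

lemma pvMem_collectStep (org : pvClause) (tmp : List pvClause) (other c : pvClause) :
    c ∈ pvCollectStep org tmp other ↔ c ∈ tmp ∨ pvB1 org other c := by
  unfold pvCollectStep pvB1
  split_ifs with h1 h2
  · simp only [Bool.and_eq_true, decide_eq_true_eq, Bool.not_eq_true',
      gt_iff_lt] at h1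
    obtain ⟨⟨hl, hs⟩, hnm⟩ := h1
    simp only [List.mem_append, List.mem_singleton]
    constructor
    · rintro (h | h)
      · exact Or.inl h
      · exact Or.inr (Or.inl ⟨h, hl, hs⟩)
    · rintro (h | (⟨he, _, _⟩ | ⟨he, hlt, _⟩))
      · exact Or.inl h
      · exact Or.inr he
      · exact absurd (he ▸ hlt) (by omega)
  · simp only [Bool.and_eq_true, decide_eq_true_eq, Bool.not_eq_true'] at h2
    obtain ⟨⟨hl, hs⟩, hnm⟩ := h2
    simp only [Bool.and_eq_true, decide_eq_true_eq, Bool.not_eq_true', gt_iff_lt,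
      not_and, Bool.not_eq_false] at h1
    simp only [List.mem_append, List.mem_singleton]
    constructor
    · rintro (h | h)
      · exact Or.inl h
      · exact Or.inr (Or.inr ⟨h, hl, hs⟩)
    · rintro (h | (⟨he, hlt, _⟩ | ⟨he, _, _⟩))
      · exact Or.inl h
      · exact absurd (he ▸ hlt) (by omega)
      · exact Or.inr he
  · constructor
    · exact Or.inl
    · rintro (h | (⟨he, hlt, hs⟩ | ⟨he, hlt, hs⟩))
      · exact h
      · subst he
        simp only [Bool.and_eq_true, decide_eq_true_eq, Bool.not_eq_true', gt_iff_lt,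
          not_and, Bool.not_eq_false] at h1
        rw [List.contains_iff_mem] at h1
        exact h1 ⟨hlt, hs⟩
      · subst he
        simp only [Bool.and_eq_true, decide_eq_true_eq, Bool.not_eq_true',
          not_and, Bool.not_eq_false] at h2
        rw [List.contains_iff_mem] at h2
        exact h2 ⟨hlt, hs⟩

lemma pvMem_foldl_collectStep (others : List pvClause) (org : pvClause) (tmp : List pvClause)
    (c : pvClause) :
    c ∈ others.foldl (pvCollectStep org) tmp ↔ c ∈ tmp ∨ ∃ other ∈ others, pvB1 org other c := by
  induction others generalizing tmp with
  | nil => simp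
  | cons o others ih =>
    rw [List.foldl_cons, ih, pvMem_collectStep org tmp o c]
    simp only [List.mem_cons]
    constructor
    · rintro ((h | h) | ⟨d, hd, hb⟩)
      · exact Or.inl h
      · exact Or.inr ⟨o, Or.inl rfl, h⟩
      · exact Or.inr ⟨d, Or.inr hd, hb⟩
    · rintro (h | ⟨d, (rfl | hd), hb⟩)
      · exact Or.inl (Or.inl h)
      · exact Or.inl (Or.inr hb)
      · exact Or.inr ⟨d, hd, hb⟩

lemma pvMem_collectInner (D : List pvClause) (tmp : List pvClause) (org c : pvClause) :
    c ∈ pvCollectInner D tmp org ↔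
      c ∈ tmp ∨ ∃ other ∈ D.drop ((PySem.List.index? D org).getD 0 + 1), pvB1 org other c := by
  unfold pvCollectInner
  exact pvMem_foldl_collectStep _ org tmp c

lemma pvMem_outer (D : List pvClause) (s : List pvClause) (tmp : List pvClause) (c : pvClause) :
    c ∈ s.foldl (pvCollectInner D) tmp ↔
      c ∈ tmp ∨ ∃ org ∈ s, ∃ other ∈ D.drop ((PySem.List.index? D org).getD 0 + 1),
        pvB1 org other c := by
  induction s generalizing tmp with
  | nil => simp
  | cons o s ih =>
    rw [List.foldl_cons, ih, pvMem_collectInner]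
    simp only [List.mem_cons]
    constructor
    · rintro ((h | ⟨d, hd, hb⟩) | ⟨g, hg, hrest⟩)
      · exact Or.inl h
      · exact Or.inr ⟨o, Or.inl rfl, d, hd, hb⟩
      · exact Or.inr ⟨g, Or.inr hg, hrest⟩
    · rintro (h | ⟨g, (rfl | hg), hrest⟩)
      · exact Or.inl (Or.inl h)
      · exact Or.inl (Or.inr hrest)
      · exact Or.inr ⟨g, hg, hrest⟩

lemma pvNot_mem_pre {u : pvClause} {pre z : List pvClause} (h : (pre ++ u :: z).Nodup) :
    u ∉ pre := by
  rw [List.nodup_append] at h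
  exact fun hm => h.2.2 u hm u (by simp) rfl

lemma pvTwo_mem_split {D : List pvClause} {a b : pvClause}
    (ha : a ∈ D) (hb : b ∈ D) (hne : a ≠ b) :
    (∃ pre mid suf, D = pre ++ a :: (mid ++ b :: suf)) ∨
    (∃ pre mid suf, D = pre ++ b :: (mid ++ a :: suf)) := by
  obtain ⟨pre, suf, rfl⟩ := List.append_of_mem ha
  rcases List.mem_append.mp hb with hbp | hbs
  · obtain ⟨p1, p2, rfl⟩ := List.append_of_mem hbp
    right
    exact ⟨p1, p2, suf, by simp⟩
  · rcases List.mem_cons.mp hbs with he | hbs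
    · exact absurd he.symm hne
    · obtain ⟨m1, m2, rfl⟩ := List.append_of_mem hbs
      left
      exact ⟨pre, m1, m2, rfl⟩

lemma pvOrg_mem_dropLast {pre T : List pvClause} {u : pvClause} (hT : T ≠ []) :
    u ∈ (pre ++ u :: T).dropLast := by
  rcases List.eq_nil_or_concat T with h | ⟨m, z, rfl⟩
  · exact absurd h hT
  · rw [List.concat_eq_append]
    have h2 : pre ++ u :: (m ++ [z]) = (pre ++ u :: m) ++ [z] := by simp
    rw [h2, List.dropLast_concat]
    simp

lemma pvIndex_split {pre T : List pvClause} {u : pvClause}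
    (h : (pre ++ u :: T).Nodup) :
    (PySem.List.index? (pre ++ u :: T) u).getD 0 = pre.length := by
  have : PySem.List.index? (pre ++ u :: T) u = some pre.length :=
    (PySem.List.index?_eq_some_iff _ _ _).mpr ⟨pre, T, rfl, rfl, pvNot_mem_pre h⟩
  rw [this]; rfl

lemma pvDrop_split (pre T : List pvClause) (u : pvClause) :
    (pre ++ u :: T).drop (pre.length + 1) = T := by
  induction pre with
  | nil => simp
  | cons a p ih => simpa using ih

lemma pvPair_iff (D : List pvClause) (hD : D.Nodup) (c : pvClause) :
    (∃ org ∈ D.dropLast, ∃ other ∈ D.drop ((PySem.List.index? D org).getD 0 + 1),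
        pvB1 org other c)
    ↔ (c ∈ D ∧ ∃ d ∈ D, d.length < c.length ∧ pvSubsums d c = true) := by
  constructor
  · rintro ⟨org, horg, other, hother, hb⟩
    have horgD : org ∈ D := (List.dropLast_sublist D).mem horg
    have hotherD : other ∈ D := (List.drop_sublist _ D).mem hother
    rcases hb with ⟨rfl, hl, hs⟩ | ⟨rfl, hl, hs⟩
    · exact ⟨hotherD, org, horgD, hl, hs⟩
    · exact ⟨horgD, other, hotherD, hl, hs⟩
  · rintro ⟨hc, d, hd, hl, hs⟩
    have hne : c ≠ d := fun e => by rw [e] at hl; omega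
    rcases pvTwo_mem_split hc hd hne with ⟨pre, mid, suf, rfl⟩ | ⟨pre, mid, suf, rfl⟩
    · -- c before d: org = c, other = d, second disjunct of pvB1
      refine ⟨c, pvOrg_mem_dropLast (by simp), d, ?_, Or.inr ⟨rfl, hl, hs⟩⟩
      rw [pvIndex_split hD, pvDrop_split]
      simp
    · -- d before c: org = d, other = c, first disjunct of pvB1
      refine ⟨d, pvOrg_mem_dropLast (by simp), c, ?_, Or.inl ⟨rfl, hl, hs⟩⟩
      rw [pvIndex_split hD, pvDrop_split]
      simp

-- ---- the delete loop is a filter ----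

lemma pvFilter_ne_erase (k : List pvClause) (c : pvClause) :
    (k.erase c).filter (fun y => !(y == c)) = k.filter (fun y => !(y == c)) := by
  induction k with
  | nil => rfl
  | cons a k ih =>
    by_cases ha : a = c
    · subst ha
      rw [List.erase_cons_head]
      simp [List.filter_cons]
    · rw [List.erase_cons_tail (by simpa using ha)]
      simp only [List.filter_cons]
      have hb : (!(a == c)) = true := by simp [ha]
      rw [hb, ih]

lemma pvRemoveAll_eq_filter (k : List pvClause) (c : pvClause) :
    pvRemoveAll k c = k.filter (fun y => !(y == c)) := by
  fun_induction pvRemoveAll k c with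
  | case1 k h ih =>
    rw [ih]
    rw [PySem.List.remove?_eq_some_erase k c h]
    simpa using pvFilter_ne_erase k c
  | case2 k h =>
    symm
    rw [List.filter_eq_self]
    intro y hy
    simp only [Bool.not_eq_eq_eq_not, Bool.not_true, beq_eq_false_iff_ne, ne_eq]
    exact fun e => h (e ▸ hy)

lemma pvFoldl_removeAll (tmp : List pvClause) (k : List pvClause) :
    tmp.foldl pvRemoveAll k = k.filter (fun y => !(tmp.contains y)) := by
  induction tmp generalizing k with
  | nil => simp
  | cons c rest ih =>
    rw [List.foldl_cons, ih, pvRemoveAll_eq_filter, List.filter_filter]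
    apply List.filter_congr
    intro y hy
    have hb : (y == c) = decide (y = c) := by
      by_cases h : y = c <;> simp [h]
    simp [List.contains_cons, Bool.not_or, Bool.and_comm, hb]

-- ---- assembly ----

lemma pvMain (knf : List pvClause) :
    subsumAndRemoveDuplicatesFromKNF knf = subsumAndRemoveDuplicatesFromKNF_alt knf := by
  unfold subsumAndRemoveDuplicatesFromKNF subsumAndRemoveDuplicatesFromKNF_alt
  rw [pvPhase1_eq_keepLast, pvAltDedup_eq]
  set D := pvKeepLast knf with hDdef
  have hD : D.Nodup := pvKeepLast_nodup knf
  rw [pvFoldl_removeAll]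
  apply List.filter_congr
  intro y hy
  congr 1
  rw [Bool.eq_iff_iff, List.contains_iff_mem, List.any_eq_true]
  rw [pvMem_outer, pvPair_iff D hD]
  simp only [List.mem_nil_iff, false_or]
  constructor
  · rintro ⟨-, d, hd, hl, hs⟩
    refine ⟨d, hd, ?_⟩
    simp only [Bool.and_eq_true, decide_eq_true_eq, List.all_eq_true]
    refine ⟨hl, fun lit hlit => ?_⟩
    rw [PySem.Set.contains_iff, PySem.Set.mem_ofList]
    exact (pvSubsums_iff d y).mp hs lit hlit
  · rintro ⟨d, hd, hp⟩
    simp only [Bool.and_eq_true, decide_eq_true_eq, List.all_eq_true] at hp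
    refine ⟨hy, d, hd, hp.1, (pvSubsums_iff d y).mpr fun l hl => ?_⟩
    have := hp.2 l hl
    rw [PySem.Set.contains_iff, PySem.Set.mem_ofList] at this
    exact this

-- ===== VERDICT (by name: the statement is the Claim_ definition above) =====
theorem subsumAndRemoveDuplicatesFromKNF_spec : Claim_equal_subsumAndRemoveDuplicatesFromKNF := by
  intro knf _
  exact pvMain knf
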